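-- pv_equiv track=rewrite | github.com/trueandre091/EGE | apr 25/01-04-25/Task-19-21-702.py | f
-- ===== SOURCE A (Python) =====
-- def f(s, m):
--     if 36 <= s <= 85: return m % 2 == 0
--     if s > 85: return m % 2 != 0
--     if m == 0: return False
--     h = [
--         f(s + 2, m - 1), f(s * 3, m - 1)
--     ]
--     return any(h) if m % 2 != 0 else all(h)
-- ===== SOURCE B (Python) =====
-- def f(s, m):
--     # iterative explicit-stack game-tree evaluation with short-circuiting
--     stack = []
--     cs, cm = s, m
--     while True:
--         if 36 <= cs <= 85:
--             v = cm % 2 == 0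
--         elif cs > 85:
--             v = cm % 2 != 0
--         elif cm == 0:
--             v = False
--         else:
--             stack.append((cs, cm))
--             cs, cm = cs + 2, cm - 1
--             continue
--         while True:
--             if not stack:
--                 return v
--             ps, pm = stack.pop()
--             if v != (pm % 2 != 0):
--                 cs, cm = ps * 3, pm - 1
--                 break
-- ===== Notes on version B (the rewrite author's own statement) =====
-- stated objective: alternative
-- what changed: Replaces A's naive binary recursion (which always builds the list of both children's values and then applies any/all) by an iterative explicit-stack evaluator: an outer loop descends along first children pushing frames, an inner loop pops frames and either short-circuits (OR with True, AND with False) or switches to the frame's second child, so the second subtree is often never evaluated.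
-- outside the precondition, e.g. on f(0, 905): A returns False, B returns False
import Mathlib
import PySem

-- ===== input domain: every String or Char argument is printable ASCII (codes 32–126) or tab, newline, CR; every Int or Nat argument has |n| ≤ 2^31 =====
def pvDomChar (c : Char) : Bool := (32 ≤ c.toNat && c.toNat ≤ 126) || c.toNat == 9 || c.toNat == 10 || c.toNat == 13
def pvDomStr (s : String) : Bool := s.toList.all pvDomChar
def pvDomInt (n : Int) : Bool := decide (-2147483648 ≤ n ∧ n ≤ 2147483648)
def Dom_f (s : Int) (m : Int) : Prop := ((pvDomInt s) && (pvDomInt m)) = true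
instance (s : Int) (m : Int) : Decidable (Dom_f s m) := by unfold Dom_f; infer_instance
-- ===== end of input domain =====

-- B replaces A's naive binary recursion by an iterative explicit-stack evaluator that
-- short-circuits the second child (alternative decomposition).

-- depth bound used only as a termination measure for both ports
def Dmeas (s : Int) (m : Int) : Nat := if 0 ≤ m then m.toNat else (36 - s).toNat

theorem Dmeas_child1 (s m : Int) (hs : s ≤ 35) (hm : m ≠ 0) (hg : ¬(s ≤ 0 ∧ m < 0)) :
    Dmeas (s + 2) (m - 1) < Dmeas s m := by
  unfold Dmeas; split_ifs <;> omega

theorem Dmeas_child2 (s m : Int) (hs : s ≤ 35) (hm : m ≠ 0) (hg : ¬(s ≤ 0 ∧ m < 0)) :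
    Dmeas (s * 3) (m - 1) < Dmeas s m := by
  unfold Dmeas; split_ifs <;> omega

-- ===== PORT A =====
-- literal port of A; the extra 's ≤ 0 ∧ m < 0' branch is a totality guard: there the Python
-- recurses without bound (outside Pre_f)
def f (s : Int) (m : Int) : Bool :=
  if 36 ≤ s ∧ s ≤ 85 then decide (m % 2 = 0)
  else if 85 < s then decide (m % 2 ≠ 0)
  else if m = 0 then false
  else if s ≤ 0 ∧ m < 0 then false
  else
    let h := [f (s + 2) (m - 1), f (s * 3) (m - 1)]
    if m % 2 ≠ 0 then h.any id else h.all id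
termination_by Dmeas s m
decreasing_by
  all_goals first
    | exact Dmeas_child1 s m (by omega) (by assumption) (by assumption)
    | exact Dmeas_child2 s m (by omega) (by assumption) (by assumption)

-- ===== PORT B =====
-- explicit stack machine: 'run' is the outer while-loop (descend along first children),
-- 'resume' is the inner while-loop (pop frames, short-circuit or switch to the second child).
def frameW (p : Int × Int) : Nat := 2 * 3 ^ (Dmeas (p.1 * 3) (p.2 - 1)) + 1
def stackW (st : List (Int × Int)) : Nat := (st.map frameW).sum

theorem stackW_cons (p : Int × Int) (st : List (Int × Int)) :
    stackW (p :: st) = frameW p + stackW st := by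
  simp [stackW]

theorem run_dec1 (cs cm : Int) (st : List (Int × Int))
    (hs : cs ≤ 35) (hm : cm ≠ 0) (hg : ¬(cs ≤ 0 ∧ cm < 0)) :
    2 * 3 ^ Dmeas (cs + 2) (cm - 1) + stackW ((cs, cm) :: st) <
      2 * 3 ^ Dmeas cs cm + stackW st := by
  rw [stackW_cons]
  have h1 := Dmeas_child1 cs cm hs hm hg
  have h2 := Dmeas_child2 cs cm hs hm hg
  have e1 : 3 ^ Dmeas (cs + 2) (cm - 1) * 3 ≤ 3 ^ Dmeas cs cm :=
    (pow_succ 3 (Dmeas (cs + 2) (cm - 1))) ▸ Nat.pow_le_pow_right (by norm_num) h1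
  have e2 : 3 ^ Dmeas (cs * 3) (cm - 1) * 3 ≤ 3 ^ Dmeas cs cm :=
    (pow_succ 3 (Dmeas (cs * 3) (cm - 1))) ▸ Nat.pow_le_pow_right (by norm_num) h2
  have p1 : 1 ≤ 3 ^ Dmeas (cs + 2) (cm - 1) := Nat.one_le_pow _ _ (by norm_num)
  simp only [frameW]
  omega

mutual
def run (cs cm : Int) (stack : List (Int × Int)) : Bool :=
  if 36 ≤ cs ∧ cs ≤ 85 then resume (decide (cm % 2 = 0)) stack
  else if 85 < cs then resume (decide (cm % 2 ≠ 0)) stack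
  else if cm = 0 then resume false stack
  else if cs ≤ 0 ∧ cm < 0 then resume false stack  -- totality guard (outside Pre_f)
  else run (cs + 2) (cm - 1) ((cs, cm) :: stack)
termination_by 2 * 3 ^ Dmeas cs cm + stackW stack
decreasing_by
  · have : 1 ≤ 3 ^ Dmeas cs cm := Nat.one_le_pow _ _ (by norm_num); omega
  · have : 1 ≤ 3 ^ Dmeas cs cm := Nat.one_le_pow _ _ (by norm_num); omega
  · have : 1 ≤ 3 ^ Dmeas cs cm := Nat.one_le_pow _ _ (by norm_num); omega
  · have : 1 ≤ 3 ^ Dmeas cs cm := Nat.one_le_pow _ _ (by norm_num); omega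
  · exact run_dec1 cs cm stack (by omega) (by assumption) (by assumption)

def resume (v : Bool) (stack : List (Int × Int)) : Bool :=
  match stack with
  | [] => v
  | (ps, pm) :: rest =>
      if v ≠ decide (pm % 2 ≠ 0) then run (ps * 3) (pm - 1) rest
      else resume v rest
termination_by stackW stack
decreasing_by
  · rw [stackW_cons]; simp only [frameW]; omega
  · rw [stackW_cons]
    have : 1 ≤ frameW (ps, pm) := by simp only [frameW]; omega
    omega
end

def f_alt (s : Int) (m : Int) : Bool := run s m []

-- ===== PRECONDITION & SPEC =====
-- Pre_f excludes exactly the inputs where the Python A raises: s ≤ 0 with m < 0 (unbounded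
-- recursion) and s ≤ 0 with m > 900 (recursion depth near Python's limit; the 900 bound is
-- conservative, so a thin band where A still returns False is also excluded — see cites).
def Pre_f (s : Int) (m : Int) : Prop := 1 ≤ s ∨ (0 ≤ m ∧ m ≤ 900)
instance (s : Int) (m : Int) : Decidable (Pre_f s m) := by unfold Pre_f; infer_instance
def pvWitness_f : Int × Int := (1, 3)
def Spec_f (s : Int) (m : Int) (out : Bool) : Prop := out = f_alt s m
instance (s : Int) (m : Int) (out : Bool) : Decidable (Spec_f s m out) := by unfold Spec_f; infer_instance

-- ===== CLAIM (what is proved, stated in full; the proofs are below) =====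
def Claim_equal_f : Prop := ∀ (s : Int) (m : Int), Dom_f s m → Pre_f s m → Spec_f s m (f s m)

-- ===== LEMMAS AND PROOFS =====

theorem resume_nil (v : Bool) : resume v [] = v := by rw [resume.eq_def]

theorem resume_cons (v : Bool) (ps pm : Int) (rest : List (Int × Int)) :
    resume v ((ps, pm) :: rest) =
      if v ≠ decide (pm % 2 ≠ 0) then run (ps * 3) (pm - 1) rest else resume v rest := by
  rw [resume.eq_def]

-- the stack machine computes A's value of the current node, folded through the stack
theorem run_resume : ∀ (n : Nat) (cs cm : Int) (stack : List (Int × Int)),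
    2 * 3 ^ Dmeas cs cm + stackW stack ≤ n → run cs cm stack = resume (f cs cm) stack := by
  intro n
  induction n using Nat.strong_induction_on with
  | _ n ih =>
    intro cs cm stack hn
    rw [run, f.eq_def]
    split_ifs with h1 h2 h3 h4 hp
    · rfl
    · rfl
    · rfl
    · rfl
    all_goals {
      have hs : cs ≤ 35 := by omega
      have hdec := run_dec1 cs cm stack hs h3 h4
      have h5 : 2 * 3 ^ Dmeas (cs + 2) (cm - 1) + stackW ((cs, cm) :: stack) < n := by omega
      rw [ih _ h5 (cs + 2) (cm - 1) ((cs, cm) :: stack) le_rfl]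
      have hd2 := Dmeas_child2 cs cm hs h3 h4
      have p1 : 1 ≤ 3 ^ Dmeas cs cm := Nat.one_le_pow _ _ (by norm_num)
      have e2 : 3 ^ Dmeas (cs * 3) (cm - 1) * 3 ≤ 3 ^ Dmeas cs cm :=
        (pow_succ 3 (Dmeas (cs * 3) (cm - 1))) ▸ Nat.pow_le_pow_right (by norm_num) hd2
      have h6 : 2 * 3 ^ Dmeas (cs * 3) (cm - 1) + stackW stack < n := by
        rw [stackW_cons] at hdec; simp only [frameW] at hdec ⊢; omega
      rw [resume_cons]
      split_ifs with hc
      · rw [ih _ h6 (cs * 3) (cm - 1) stack le_rfl]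
        have hv : f (cs + 2) (cm - 1) = !decide (cm % 2 ≠ 0) := Bool.eq_not_of_ne hc
        simp [hv, hp]
      · have hv : f (cs + 2) (cm - 1) = decide (cm % 2 ≠ 0) := by simpa using hc
        simp [hv, hp]
    }

-- ===== VERDICT (by name: the statement is the Claim_ definition above) =====
theorem f_spec : Claim_equal_f := by
  intro s m _ _
  unfold Spec_f f_alt
  rw [run_resume (2 * 3 ^ Dmeas s m + stackW []) s m [] le_rfl, resume_nil]
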